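-- pv_equiv track=rewrite | github.com/lchristie/Sums-of-Roots-of-Unity | support.py | pFactor
-- ===== SOURCE A (Python) =====
-- import math
--
-- def isPrime(number):
--     if number > 1:
--         if number == 2:
--             return True
--         if number % 2 == 0:
--             return False
--         for current in range(3, int(math.sqrt(number) + 1), 2):
--             if number % current == 0:
--                 return False
--         return True
--     return False
--
-- def getPrimes(number):
--     while True:
--         if isPrime(number):
--             yield number
--         number += 1
--
-- def pFactor (n):
--     pFactors = []
--
--     prime = 1
--     primes = getPrimes(1)
--
--     while prime <= n:
--         if n % prime == 0:
--             pFactors.append(prime)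
--         prime = next(primes)
--
--     return pFactors
-- ===== SOURCE B (Python) =====
-- def pFactor(n):
--     # Trial division up to sqrt(m), dividing out each found prime factor.
--     if n < 1:
--         return []
--     factors = [1]
--     m = n
--     d = 2
--     while d * d <= m:
--         if m % d == 0:
--             factors.append(d)
--             while m % d == 0:
--                 m //= d
--         d += 1
--     if m > 1:
--         factors.append(m)
--     return factors
-- ===== Notes on version B (the rewrite author's own statement) =====
-- stated objective: faster
-- what changed: A scans every integer up to n, primality-testing each with trial division, to collect prime divisors; B trial-divides n itself up to sqrt(m) while dividing out each found factor, so no primality test and no scan beyond sqrt(n).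
import Mathlib
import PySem

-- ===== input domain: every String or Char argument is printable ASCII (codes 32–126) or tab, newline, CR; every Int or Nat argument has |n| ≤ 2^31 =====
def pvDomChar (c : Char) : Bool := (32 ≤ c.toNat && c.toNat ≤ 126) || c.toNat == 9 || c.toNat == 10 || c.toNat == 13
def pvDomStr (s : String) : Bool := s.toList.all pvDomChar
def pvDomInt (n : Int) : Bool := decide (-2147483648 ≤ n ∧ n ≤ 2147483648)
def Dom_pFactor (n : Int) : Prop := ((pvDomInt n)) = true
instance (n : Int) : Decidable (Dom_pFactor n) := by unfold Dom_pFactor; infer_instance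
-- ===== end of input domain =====

-- B replaces A's scan of all integers up to n (each primality-tested) by trial division of n
-- itself up to the square root of the remaining cofactor: objective = faster.

-- ===== PORT A =====
-- int(math.sqrt(number) + 1) is ported as Int.sqrt number + 1 (exact on the stated domain
-- |number| ≤ 2^31, where the float sqrt is exact enough that int(math.sqrt(x)+1) = isqrt(x)+1).
def isPrimeA (number : Int) : Bool :=
  if number > 1 then
    if number == 2 then true
    else if PySem.Int.mod number 2 == 0 then false
    else (PySem.List.pyRange 3 (Int.sqrt number + 1) 2).all
          (fun current => !(PySem.Int.mod number current == 0))
  else false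

-- A's while loop drives the generator getPrimes(1), which enumerates 1,2,3,… filtering by
-- isPrime; the loop exits at the first prime > n, so exactly prime = 1 and then the isPrime
-- candidates 2..n are tested for divisibility, in this order.
def pFactor (n : Int) : List Int :=
  if 1 ≤ n then
    (if PySem.Int.mod n 1 == 0 then [1] else []) ++
      (PySem.List.pyRange 2 (n + 1) 1).foldl
        (fun acc c => if isPrimeA c && PySem.Int.mod n c == 0 then acc ++ [c] else acc) []
  else []

-- ===== PORT B =====
-- inner loop 'while m % d == 0: m //= d' of Source B, with a fuel counter as totality guard
-- (m.toNat steps always suffice: m shrinks at every division; the guard changes nothing else)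
def stripGo : Nat -> Int -> Int -> Int
  | 0, m, _ => m
  | fuel + 1, m, d =>
    if PySem.Int.mod m d = 0 then stripGo fuel (PySem.Int.floordiv m d) d else m

def stripB (m d : Int) : Int := stripGo m.toNat m d

-- outer while loop of Source B, fuel as totality guard (n.toNat iterations suffice since d only
-- grows and stops past sqrt m); the trailing 'if m > 1: factors.append(m)' is the exit case
def bloopGo : Nat -> Int -> Int -> List Int
  | 0, m, _ => if 1 < m then [m] else []
  | fuel + 1, m, d =>
    if d * d <= m then
      if PySem.Int.mod m d = 0 then d :: bloopGo fuel (stripB m d) (d + 1)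
      else bloopGo fuel m (d + 1)
    else if 1 < m then [m] else []

def pFactor_alt (n : Int) : List Int :=
  if n < 1 then [] else 1 :: bloopGo n.toNat n 2

-- ===== PRECONDITION & SPEC =====
def Spec_pFactor (n : Int) (out : List Int) : Prop := out = pFactor_alt n
instance (n : Int) (out : List Int) : Decidable (Spec_pFactor n out) := by unfold Spec_pFactor; infer_instance

-- ===== CLAIM (what is proved, stated in full; the proofs are below) =====
def Claim_equal_pFactor : Prop := ∀ (n : Int), Dom_pFactor n → Spec_pFactor n (pFactor n)

-- ===== LEMMAS AND PROOFS =====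

theorem dvd_iff_toNat {a b : Int} (ha : 0 ≤ a) (hb : 0 ≤ b) : a ∣ b ↔ a.toNat ∣ b.toNat := by
  rw [← Int.natCast_dvd_natCast]
  simp [Int.toNat_of_nonneg ha, Int.toNat_of_nonneg hb]

theorem primeInt {p : Int} (h2 : 2 ≤ p) (hp : p.toNat.Prime) : Prime p := by
  rw [Int.prime_iff_natAbs_prime]
  have h : p.natAbs = p.toNat := by omega
  rwa [h]

theorem filter_singleton_of {l : List Int} {p : Int → Bool} {m : Int}
    (hnd : l.Nodup) (hm : m ∈ l) (h : ∀ x ∈ l, p x = true ↔ x = m) : l.filter p = [m] := by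
  induction l with
  | nil => cases hm
  | cons a t ih =>
    rcases List.nodup_cons.mp hnd with ⟨ha, hnt⟩
    rcases List.mem_cons.mp hm with rfl | hmt
    · rw [List.filter_cons_of_pos ((h _ (List.mem_cons_self)).mpr rfl)]
      have ht : t.filter p = [] := List.filter_eq_nil_iff.mpr
        (fun x hx hpx => ha (((h x (List.mem_cons_of_mem _ hx)).mp hpx) ▸ hx))
      rw [ht]
    · have hne : a ≠ m := fun e => ha (e ▸ hmt)
      have hpa : ¬ p a = true := fun hpa => hne ((h a (List.mem_cons_self)).mp hpa)
      rw [List.filter_cons_of_neg (by simpa using hpa)]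
      exact ih hnt hmt (fun x hx => h x (List.mem_cons_of_mem _ hx))

theorem isPrimeA_iff (c : Int) (hc : 2 ≤ c) : (isPrimeA c = true ↔ c.toNat.Prime) := by
  obtain ⟨m, rfl⟩ : ∃ m : ℕ, c = ↑m := ⟨c.toNat, (Int.toNat_of_nonneg (by omega)).symm⟩
  have hm : 2 ≤ m := by exact_mod_cast hc
  rw [isPrimeA, if_pos (by exact_mod_cast (by omega : (1:Int) < (m:Int)))]
  rw [Int.toNat_natCast]
  by_cases h2 : m = 2
  · subst h2; norm_num [Nat.prime_two]
  · have hbe : (((m:Int)) == 2) = false := by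
      simp only [beq_eq_false_iff_ne, Ne]; exact_mod_cast fun e => h2 (by exact_mod_cast e)
    rw [hbe]
    simp only [Bool.false_eq_true, if_false]
    by_cases hev : 2 ∣ m
    · have hmod : PySem.Int.mod (↑m) 2 = 0 :=
        (PySem.Int.mod_eq_zero_iff_dvd _ _).mpr (by exact_mod_cast hev)
      simp only [hmod]
      norm_num
      exact fun hp => h2 (((Nat.prime_dvd_prime_iff_eq Nat.prime_two hp).mp hev)).symm
    · have hmod : (PySem.Int.mod (↑m) 2 == 0) = false := by
        simp only [beq_eq_false_iff_ne, Ne]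
        exact fun h => hev (by exact_mod_cast (PySem.Int.mod_eq_zero_iff_dvd _ _).mp h)
      rw [hmod]
      simp only [Bool.false_eq_true, if_false, List.all_eq_true]
      constructor
      · intro hall
        by_contra hnp
        have hqp : m.minFac.Prime := Nat.minFac_prime (by omega)
        have hqd : m.minFac ∣ m := Nat.minFac_dvd m
        have hqsq : m.minFac ^ 2 ≤ m := Nat.minFac_sq_le_self (by omega) hnp
        have hq2 : m.minFac ≠ 2 := fun e => hev (e ▸ hqd)
        have hq3 : 3 ≤ m.minFac := by have := hqp.two_le; omega
        have hqodd : m.minFac % 2 = 1 := (Nat.Prime.eq_two_or_odd hqp).resolve_left hq2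
        have hmem : ((m.minFac : Int)) ∈ PySem.List.pyRange 3 (Int.sqrt ↑m + 1) 2 := by
          rw [PySem.List.mem_pyRange_iff_of_pos (by norm_num)]
          refine ⟨by exact_mod_cast hq3, ?_, ?_⟩
          · rw [Int.sqrt_natCast]
            have hle : m.minFac ≤ m.sqrt := Nat.le_sqrt.mpr (by nlinarith [hqsq])
            have hle' : ((m.minFac : Int)) ≤ ((m.sqrt : Int)) := by exact_mod_cast hle
            omega
          · omega
        have hfalse := hall _ hmem
        simp only [Bool.not_eq_true', beq_eq_false_iff_ne, Ne] at hfalse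
        exact hfalse ((PySem.Int.mod_eq_zero_iff_dvd _ _).mpr (by exact_mod_cast hqd))
      · intro hp cur hcur
        have hmem := (PySem.List.mem_pyRange_iff_of_pos (by norm_num : (0:Int) < 2) cur).mp hcur
        simp only [Bool.not_eq_true', beq_eq_false_iff_ne, Ne]
        intro h0
        have hcd : cur ∣ (m:Int) := (PySem.Int.mod_eq_zero_iff_dvd _ _).mp h0
        have h3 : (3:Int) ≤ cur := hmem.1
        have hcdn : cur.toNat ∣ m := by
          have := (dvd_iff_toNat (by omega : (0:Int) ≤ cur) (by omega : (0:Int) ≤ (m:Int))).mp hcd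
          simpa using this
        rcases hp.eq_one_or_self_of_dvd cur.toNat hcdn with h | h
        · omega
        · have hcm : cur = ((m:Int)) := by omega
          have hlt : ((m:Int)) < Int.sqrt ↑m + 1 := hcm ▸ hmem.2.1
          rw [Int.sqrt_natCast] at hlt
          have hms : m.sqrt < m := Nat.sqrt_lt_self (by omega)
          have : ((m.sqrt : Int)) < ((m : Int)) := by exact_mod_cast hms
          omega

theorem floordiv_pos_of {m d : Int} (hd : 2 ≤ d) (hm : 0 < m)
    (h0 : PySem.Int.mod m d = 0) : 0 < PySem.Int.floordiv m d := by
  rw [PySem.Int.floordiv_eq_ediv_of_pos (by omega)]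
  have hdvd : d ∣ m := (PySem.Int.mod_eq_zero_iff_dvd m d).mp h0
  have h1 : d ≤ m := Int.le_of_dvd hm hdvd
  have := (Int.le_ediv_iff_mul_le (by omega : (0:Int) < d)).mpr (by omega : 1 * d ≤ m)
  omega

theorem floordiv_lt_of {m d : Int} (hd : 2 ≤ d) (hm : 0 < m) : PySem.Int.floordiv m d < m := by
  rw [PySem.Int.floordiv_eq_ediv_of_pos (by omega)]
  exact Int.ediv_lt_of_lt_mul (by omega) (by nlinarith)

theorem floordiv_dvd_of {m d : Int} (hd : 2 ≤ d) (h0 : PySem.Int.mod m d = 0) :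
    PySem.Int.floordiv m d ∣ m := by
  have hdvd : d ∣ m := (PySem.Int.mod_eq_zero_iff_dvd m d).mp h0
  rw [PySem.Int.floordiv_eq_ediv_of_pos (by omega)]
  exact ⟨d, (Int.ediv_mul_cancel hdvd).symm⟩

theorem stripGo_pos (d : Int) (hd : 2 ≤ d) : ∀ (f : Nat) (m : Int), 0 < m → 0 < stripGo f m d := by
  intro f
  induction f with
  | zero => intro m hm; exact hm
  | succ f ih =>
      intro m hm
      simp only [stripGo]
      by_cases h0 : PySem.Int.mod m d = 0
      · rw [if_pos h0]
        exact ih _ (floordiv_pos_of hd hm h0)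
      · rw [if_neg h0]; exact hm

theorem stripGo_dvd (d : Int) (hd : 2 ≤ d) : ∀ (f : Nat) (m : Int), 0 < m → stripGo f m d ∣ m := by
  intro f
  induction f with
  | zero => intro m _; exact dvd_refl m
  | succ f ih =>
      intro m hm
      simp only [stripGo]
      by_cases h0 : PySem.Int.mod m d = 0
      · rw [if_pos h0]
        exact dvd_trans (ih _ (floordiv_pos_of hd hm h0)) (floordiv_dvd_of hd h0)
      · rw [if_neg h0]

theorem stripGo_not_dvd (d : Int) (hd : 2 ≤ d) : ∀ (f : Nat) (m : Int), 0 < m → m.toNat ≤ f →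
    ¬ d ∣ stripGo f m d := by
  intro f
  induction f with
  | zero => intro m hm hf; omega
  | succ f ih =>
      intro m hm hf
      simp only [stripGo]
      by_cases h0 : PySem.Int.mod m d = 0
      · rw [if_pos h0]
        have hlt := floordiv_lt_of hd hm
        have hpos := floordiv_pos_of hd hm h0
        exact ih _ hpos (by omega)
      · rw [if_neg h0]
        exact fun hdvd => h0 ((PySem.Int.mod_eq_zero_iff_dvd m d).mpr hdvd)

theorem stripGo_dvd_iff (d p : Int) (hd : 2 ≤ d) (hdp : d.toNat.Prime)
    (hp2 : 2 ≤ p) (hpp : p.toNat.Prime) (hne : p ≠ d) :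
    ∀ (f : Nat) (m : Int), 0 < m → (p ∣ m ↔ p ∣ stripGo f m d) := by
  intro f
  induction f with
  | zero => intro m _; exact Iff.rfl
  | succ f ih =>
      intro m hm
      simp only [stripGo]
      by_cases h0 : PySem.Int.mod m d = 0
      · rw [if_pos h0]
        have hdvd : d ∣ m := (PySem.Int.mod_eq_zero_iff_dvd m d).mp h0
        have hq : PySem.Int.floordiv m d = m / d := PySem.Int.floordiv_eq_ediv_of_pos (by omega)
        have hstep : p ∣ m ↔ p ∣ PySem.Int.floordiv m d := by
          rw [hq]
          constructor
          · intro hpm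
            have hmul : m = (m / d) * d := (Int.ediv_mul_cancel hdvd).symm
            have hprime : Prime p := primeInt hp2 hpp
            rcases hprime.dvd_mul.mp (hmul ▸ hpm) with h1 | h1
            · exact h1
            · exfalso
              have hnd : p.toNat ∣ d.toNat := (dvd_iff_toNat (by omega) (by omega)).mp h1
              have := (Nat.prime_dvd_prime_iff_eq hpp hdp).mp hnd
              exact hne (by omega)
          · intro hpq
            exact dvd_trans hpq (hq ▸ floordiv_dvd_of hd h0)
        rw [hstep]
        exact ih _ (floordiv_pos_of hd hm h0)
      · rw [if_neg h0]

theorem stripB_pos (m d : Int) (hd : 2 ≤ d) (hm : 0 < m) : 0 < stripB m d :=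
  stripGo_pos d hd m.toNat m hm

theorem stripB_dvd (m d : Int) (hd : 2 ≤ d) (hm : 0 < m) : stripB m d ∣ m :=
  stripGo_dvd d hd m.toNat m hm

theorem stripB_not_dvd (m d : Int) (hd : 2 ≤ d) (hm : 0 < m) : ¬ d ∣ stripB m d :=
  stripGo_not_dvd d hd m.toNat m hm le_rfl

theorem stripB_lt (m d : Int) (hd : 2 ≤ d) (hm : 0 < m) (h0 : PySem.Int.mod m d = 0) :
    stripB m d < m := by
  have hdvd : d ∣ m := (PySem.Int.mod_eq_zero_iff_dvd m d).mp h0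
  have hle : stripB m d ≤ m := Int.le_of_dvd hm (stripB_dvd m d hd hm)
  have hne : stripB m d ≠ m := fun e => stripB_not_dvd m d hd hm (by rw [e]; exact hdvd)
  omega

theorem stripB_dvd_iff (m d p : Int) (hm : 0 < m) (hd : 2 ≤ d) (hdp : d.toNat.Prime)
    (hp2 : 2 ≤ p) (hpp : p.toNat.Prime) (hne : p ≠ d) : (p ∣ m ↔ p ∣ stripB m d) :=
  stripGo_dvd_iff d p hd hdp hp2 hpp hne m.toNat m hm

-- the "m is prime once no candidate ≤ sqrt remains" step, shared by the invariant's base case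
theorem cofactor_prime (m d : Int) (hd : 2 ≤ d) (hm : 1 < m) (hstop : ¬ (d * d ≤ m))
    (H1 : ∀ p : Int, 2 ≤ p → p.toNat.Prime → p ∣ m → d ≤ p) : m.toNat.Prime := by
  by_contra hnp
  have hq := Nat.minFac_prime (show m.toNat ≠ 1 by omega)
  have hqd : ((m.toNat.minFac : Int)) ∣ m := by
    have h := Int.natCast_dvd_natCast.mpr (Nat.minFac_dvd m.toNat)
    rwa [Int.toNat_of_nonneg (by omega : (0:Int) ≤ m)] at h
  have hq2 : (2:Int) ≤ ↑m.toNat.minFac := by exact_mod_cast hq.two_le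
  have hdq := H1 _ hq2 (by simpa using hq) hqd
  have hsq : m.toNat.minFac ^ 2 ≤ m.toNat := Nat.minFac_sq_le_self (by omega) hnp
  have hsq' : ((m.toNat.minFac : Int)) * ↑m.toNat.minFac ≤ m := by
    have h := (Nat.cast_le (α := Int)).mpr hsq
    push_cast at h
    have hmm : ((m.toNat : Int)) = m := Int.toNat_of_nonneg (by omega)
    nlinarith [h]
  exact hstop (by nlinarith [hdq, hq2, hsq'])

-- base case: the loop has stopped; the trailing cofactor (if > 1) is the one remaining prime
theorem main_base (n m d : Int) (hn : 0 < n) (hd : 2 ≤ d) (hm : 0 < m) (hmn : m ∣ n)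
    (hstop : ¬ (d * d ≤ m))
    (H1 : ∀ p : Int, 2 ≤ p → p.toNat.Prime → p ∣ m → d ≤ p)
    (H2 : ∀ p : Int, 2 ≤ p → p.toNat.Prime → d ≤ p → (p ∣ n ↔ p ∣ m)) :
    (if 1 < m then [m] else ([] : List Int))
      = (PySem.List.pyRange d (n + 1) 1).filter
          (fun c => isPrimeA c && PySem.Int.mod n c == 0) := by
  by_cases h1 : 1 < m
  · rw [if_pos h1]
    have hmp : m.toNat.Prime := cofactor_prime m d hd h1 hstop H1
    symm
    apply filter_singleton_of (PySem.List.nodup_pyRange_one _ _)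
    · rw [PySem.List.mem_pyRange_one]
      have hmle : m ≤ n := Int.le_of_dvd hn hmn
      exact ⟨H1 m (by omega) hmp (dvd_refl m), by omega⟩
    · intro c hcmem
      rw [PySem.List.mem_pyRange_one] at hcmem
      constructor
      · intro hgood
        rw [Bool.and_eq_true, beq_iff_eq] at hgood
        have hcp : c.toNat.Prime := (isPrimeA_iff c (by omega)).mp hgood.1
        have hcn : c ∣ n := (PySem.Int.mod_eq_zero_iff_dvd _ _).mp hgood.2
        have hcm : c ∣ m := (H2 c (by omega) hcp hcmem.1).mp hcn
        have hnn : c.toNat ∣ m.toNat := (dvd_iff_toNat (by omega) (by omega)).mp hcm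
        have := (Nat.prime_dvd_prime_iff_eq hcp hmp).mp hnn
        omega
      · rintro rfl
        rw [Bool.and_eq_true, beq_iff_eq, PySem.Int.mod_eq_zero_iff_dvd]
        exact ⟨(isPrimeA_iff _ (by omega)).mpr hmp, hmn⟩
  · rw [if_neg h1]
    have hm1 : m = 1 := by omega
    symm
    apply List.filter_eq_nil_iff.mpr
    intro c hcmem hgood
    rw [PySem.List.mem_pyRange_one] at hcmem
    rw [Bool.and_eq_true, beq_iff_eq] at hgood
    have hcp : c.toNat.Prime := (isPrimeA_iff c (by omega)).mp hgood.1
    have hcn : c ∣ n := (PySem.Int.mod_eq_zero_iff_dvd _ _).mp hgood.2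
    have hcm : c ∣ m := (H2 c (by omega) hcp hcmem.1).mp hcn
    rw [hm1] at hcm
    have := Int.le_of_dvd (by omega) hcm
    omega

-- the invariant of B's outer loop, stated against A's filtered prime scan
theorem main_inv (n : Int) (hn : 0 < n) : ∀ k : Nat, ∀ m d : Int,
    (m + 1 - d).toNat ≤ k → 2 ≤ d → 0 < m → m ∣ n →
    (∀ p : Int, 2 ≤ p → p.toNat.Prime → p ∣ m → d ≤ p) →
    (∀ p : Int, 2 ≤ p → p.toNat.Prime → d ≤ p → (p ∣ n ↔ p ∣ m)) →
    bloopGo k m d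
      = (PySem.List.pyRange d (n + 1) 1).filter
          (fun c => isPrimeA c && PySem.Int.mod n c == 0) := by
  intro k
  induction k with
  | zero =>
      intro m d hk hd hm hmn H1 H2
      have hdm : m + 1 ≤ d := by omega
      have hstop : ¬ (d * d ≤ m) := by nlinarith
      simp only [bloopGo]
      exact main_base n m d hn hd hm hmn hstop H1 H2
  | succ k ih =>
      intro m d hk hd hm hmn H1 H2
      simp only [bloopGo]
      by_cases hcond : d * d ≤ m
      · rw [if_pos hcond]
        have hdm_le : d ≤ m := le_trans (by nlinarith : d ≤ d * d) hcond
        have hdn : d ≤ n := le_trans hdm_le (Int.le_of_dvd hn hmn)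
        have hcons := PySem.List.pyRange_one_cons (show d < n + 1 by omega)
        by_cases hmod : PySem.Int.mod m d = 0
        · rw [if_pos hmod]
          have hdvd : d ∣ m := (PySem.Int.mod_eq_zero_iff_dvd _ _).mp hmod
          have hdp : d.toNat.Prime := by
            have hq := Nat.minFac_prime (show d.toNat ≠ 1 by omega)
            have hqd : ((d.toNat.minFac : Int)) ∣ d := by
              have h := Int.natCast_dvd_natCast.mpr (Nat.minFac_dvd d.toNat)
              rwa [Int.toNat_of_nonneg (by omega : (0:Int) ≤ d)] at h
            have hqm : ((d.toNat.minFac : Int)) ∣ m := dvd_trans hqd hdvd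
            have hge := H1 _ (by exact_mod_cast hq.two_le) (by simpa using hq) hqm
            have hle : d.toNat.minFac ≤ d.toNat := Nat.minFac_le (by omega)
            have heq : d.toNat.minFac = d.toNat := by omega
            exact heq ▸ hq
          have hgood : (isPrimeA d && PySem.Int.mod n d == 0) = true := by
            rw [Bool.and_eq_true, beq_iff_eq, PySem.Int.mod_eq_zero_iff_dvd]
            exact ⟨(isPrimeA_iff d hd).mpr hdp, (H2 d hd hdp le_rfl).mpr hdvd⟩
          rw [hcons]
          simp only [List.filter_cons]
          rw [if_pos hgood]
          congr 1
          have hspos := stripB_pos m d hd hm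
          have hslt := stripB_lt m d hd hm hmod
          have hsdvd := stripB_dvd m d hd hm
          have hsnd := stripB_not_dvd m d hd hm
          refine ih (stripB m d) (d + 1) (by omega) (by omega) hspos
            (dvd_trans hsdvd hmn) ?_ ?_
          · intro p hp2 hpp hps
            have hge := H1 p hp2 hpp (dvd_trans hps hsdvd)
            have hpne : p ≠ d := fun e => hsnd (e ▸ hps)
            omega
          · intro p hp2 hpp hpd
            rw [H2 p hp2 hpp (by omega)]
            exact stripB_dvd_iff m d p hm hd hdp hp2 hpp (by omega)
        · rw [if_neg hmod]
          have hndvd : ¬ d ∣ m := fun h => hmod ((PySem.Int.mod_eq_zero_iff_dvd _ _).mpr h)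
          have hgood : ¬ ((isPrimeA d && PySem.Int.mod n d == 0) = true) := by
            rw [Bool.and_eq_true, beq_iff_eq, PySem.Int.mod_eq_zero_iff_dvd]
            rintro ⟨hA, hB⟩
            exact hndvd ((H2 d hd ((isPrimeA_iff d hd).mp hA) le_rfl).mp hB)
          rw [hcons]
          simp only [List.filter_cons]
          rw [if_neg hgood]
          refine ih m (d + 1) (by omega) (by omega) hm hmn ?_ ?_
          · intro p hp2 hpp hpm
            have hge := H1 p hp2 hpp hpm
            have hpne : p ≠ d := fun e => hndvd (e ▸ hpm)
            omega
          · intro p hp2 hpp hpd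
            exact H2 p hp2 hpp (by omega)
      · rw [if_neg hcond]
        exact main_base n m d hn hd hm hmn hcond H1 H2

-- ===== VERDICT (by name: the statement is the Claim_ definition above) =====
theorem pFactor_spec : Claim_equal_pFactor := by
  intro n _
  show pFactor n = pFactor_alt n
  unfold pFactor pFactor_alt
  by_cases hn : 1 ≤ n
  · rw [if_pos hn, if_neg (by omega : ¬ n < 1)]
    rw [PySem.List.foldl_append_if_eq_filter, main_inv n (by omega) n.toNat n 2
      (by omega) (by omega) (by omega) (dvd_refl n)
      (fun p hp2 _ _ => hp2) (fun p _ _ _ => Iff.rfl)]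
    simp
  · rw [if_neg hn, if_pos (by omega)]
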